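-- pv_equiv track=rewrite | github.com/lacayodaniel/essentials | python-essentials/mathworks.py | freq_of_max
-- ===== SOURCE A (Python) =====
-- def freq_of_max(cars, carQ):
-- 	carQ.sort(reverse=True)
-- 	record_max = max(cars[carQ[0] - 1:])
-- 	record_freq = cars[carQ[0] - 1:].count(record_max)
-- 	ans = [record_freq]
-- 	for i in range(len(carQ) - 1):
-- 		# check if the next lookahead array == previous lookahead array
-- 		# speed up duplicate entries in carQ
-- 		if carQ[i + 1] == carQ[i]:
-- 			ans.append(record_freq)  # ans[i+1] = ans[i]
-- 			continue
-- 		# check if max(lookahead) is relevant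
-- 		# prune next lookahead array if max is less than record_max
-- 		curr_max = max(cars[carQ[i + 1] - 1:carQ[i] - 1])
-- 		if curr_max < record_max:  # max(next subarray) < max(current subarray)
-- 			ans.append(record_freq)
-- 			continue
-- 		curr_freq = cars[carQ[i + 1] - 1:carQ[i] - 1].count(curr_max)
-- 		if curr_max == record_max:
-- 			record_freq += curr_freq  # next sub array freq + current sub array freq
-- 		else:  # curr_max > record_max
-- 			record_max = curr_max
-- 			record_freq = curr_freq  # next sub array freq only
-- 		ans.append(record_freq)
-- 	return ans
-- ===== SOURCE B (Python) =====
-- def freq_of_max(cars, carQ):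
--     carQ.sort(reverse=True)
--     ans = []
--     for q in carQ:
--         suffix = cars[q - 1:]
--         m = max(suffix)
--         ans.append(suffix.count(m))
--     return ans
-- ===== Notes on version B (the rewrite author's own statement) =====
-- stated objective: simpler
-- what changed: Replaces A's incremental record-keeping scan over inter-query segments (duplicate- and pruning-branches, running record_max/record_freq state) with the direct spec-level computation: for each sorted query, take the suffix cars[q-1:] and return the count of its maximum.
import Mathlib
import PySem

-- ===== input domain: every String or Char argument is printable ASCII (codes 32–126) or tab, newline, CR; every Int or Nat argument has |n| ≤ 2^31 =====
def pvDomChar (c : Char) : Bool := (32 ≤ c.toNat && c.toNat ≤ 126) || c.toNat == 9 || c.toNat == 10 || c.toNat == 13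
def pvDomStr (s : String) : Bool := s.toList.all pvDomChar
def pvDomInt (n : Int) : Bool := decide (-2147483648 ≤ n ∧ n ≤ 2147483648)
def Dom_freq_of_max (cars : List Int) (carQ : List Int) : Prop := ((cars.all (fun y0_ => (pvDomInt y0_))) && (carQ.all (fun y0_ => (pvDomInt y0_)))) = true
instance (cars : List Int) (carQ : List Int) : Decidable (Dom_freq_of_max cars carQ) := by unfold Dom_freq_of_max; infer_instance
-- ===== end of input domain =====

-- B replaces A's incremental record-keeping scan over inter-query segments by the direct
-- per-query computation max/count over the suffix cars[q-1:] (objective: simpler). Both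
-- Pythons sort carQ in place (the same observable mutation); the equivalence proved here
-- is about the return value.

-- ===== PORT A =====
-- 'for i in range(len(carQ)-1)' reads carQ[i] (prev) and carQ[i+1] (q): ported as the
-- obvious structural recursion over the adjacent pairs with the same state
-- (record_max, record_freq, ans).
def freqLoopA (cars : List Int) (prev : Int) (rest : List Int)
    (rm rf : Int) (ans : List Int) : List Int :=
  match rest with
  | [] => ans
  | q :: rest' =>
    if q == prev then freqLoopA cars q rest' rm rf (ans ++ [rf])
    else
      let seg := PySem.List.slice cars (some (q - 1)) (some (prev - 1))
      let cm := (PySem.List.max? seg (fun x => x)).getD 0  -- Python max() raises on empty seg: outside Pre_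
      if cm < rm then freqLoopA cars q rest' rm rf (ans ++ [rf])
      else
        let cf : Int := (PySem.List.count seg cm : Int)
        if cm == rm then freqLoopA cars q rest' rm (rf + cf) (ans ++ [rf + cf])
        else freqLoopA cars q rest' cm cf (ans ++ [cf])

def freq_of_max (cars : List Int) (carQ : List Int) : List Int :=
  let s := PySem.List.sorted carQ (fun x => x) true   -- carQ.sort(reverse=True)
  match s with
  | [] => []   -- Python raises IndexError on carQ[0] here: outside Pre_
  | q0 :: rest =>
    let seg0 := PySem.List.slice cars (some (q0 - 1)) none
    let rm := (PySem.List.max? seg0 (fun x => x)).getD 0  -- Python max() raises on empty seg0: outside Pre_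
    let rf : Int := (PySem.List.count seg0 rm : Int)
    freqLoopA cars q0 rest rm rf [rf]

-- ===== PORT B =====
-- Source B's 'for q in carQ: ans.append(...)' loop, one answer per sorted query
def bLoop (cars : List Int) (qs : List Int) (ans : List Int) : List Int :=
  match qs with
  | [] => ans
  | q :: rest =>
    let suffix := PySem.List.slice cars (some (q - 1)) none
    let m := (PySem.List.max? suffix (fun x => x)).getD 0  -- Python max() raises on empty suffix: outside Pre_
    bLoop cars rest (ans ++ [(PySem.List.count suffix m : Int)])

def freq_of_max_alt (cars : List Int) (carQ : List Int) : List Int :=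
  bLoop cars (PySem.List.sorted carQ (fun x => x) true) []   -- carQ.sort(reverse=True)

-- ===== PRECONDITION & SPEC =====
-- Pre_ is exactly A's normal-return domain: nonempty cars and carQ, every query at most
-- len(cars), and the clamped slice-start map q |-> clampIdx len(cars) (q-1) strictly
-- monotone on the queries — whenever any of this fails, Python A raises (IndexError on
-- carQ[0] or ValueError from max() on an empty slice).
def Pre_freq_of_max (cars : List Int) (carQ : List Int) : Prop :=
  cars ≠ [] ∧ carQ ≠ [] ∧ (∀ q ∈ carQ, q ≤ (cars.length : Int)) ∧
    (∀ q ∈ carQ, ∀ q' ∈ carQ, q < q' →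
      PySem.List.clampIdx cars.length (q - 1) < PySem.List.clampIdx cars.length (q' - 1))
instance (cars : List Int) (carQ : List Int) : Decidable (Pre_freq_of_max cars carQ) := by
  unfold Pre_freq_of_max; infer_instance
def pvWitness_freq_of_max : List Int × List Int := ([3, 1, 3], [1, 2, 3])

def Spec_freq_of_max (cars : List Int) (carQ : List Int) (out : List Int) : Prop := out = freq_of_max_alt cars carQ
instance (cars : List Int) (carQ : List Int) (out : List Int) : Decidable (Spec_freq_of_max cars carQ out) := by unfold Spec_freq_of_max; infer_instance

-- ===== CLAIM (what is proved, stated in full; the proofs are below) =====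
def Claim_equal_freq_of_max : Prop := ∀ (cars : List Int) (carQ : List Int), Dom_freq_of_max cars carQ → Pre_freq_of_max cars carQ → Spec_freq_of_max cars carQ (freq_of_max cars carQ)

-- ===== LEMMAS AND PROOFS =====

-- specification value: the max of a nonempty Int list, and the frequency of that max
def segMax : List Int → Int
  | [] => 0
  | c :: r => r.foldl max c

def segCnt (l : List Int) : Int := (l.count (segMax l) : Int)

theorem segMax_eq_max? (l : List Int) (hl : l ≠ []) : l.max? = some (segMax l) := by
  cases l with
  | nil => cases hl rfl
  | cons c r => exact List.max?_cons'

theorem le_segMax (l : List Int) (x : Int) (hx : x ∈ l) : x ≤ segMax l := by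
  cases l with
  | nil => cases hx
  | cons c r =>
    rcases List.mem_cons.1 hx with h | h
    · subst h; exact (PySem.List.le_foldl_max r x).1
    · exact (PySem.List.le_foldl_max r c).2 x h

theorem segMax_append (a b : List Int) (ha : a ≠ []) (hb : b ≠ []) :
    segMax (a ++ b) = max (segMax a) (segMax b) := by
  cases a with
  | nil => cases ha rfl
  | cons c r =>
    show (r ++ b).foldl max c = max ((r).foldl max c) (segMax b)
    rw [List.foldl_append, List.foldl_max (l := b), segMax_eq_max? b hb]
    rfl

theorem count_eq_zero_of_gt_segMax (l : List Int) (m : Int) (h : segMax l < m) :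
    l.count m = 0 := by
  rw [List.count_eq_zero]
  intro hm
  exact absurd (le_segMax l m hm) (not_le.2 h)

-- PySem max? with identity key is segMax
theorem max?_eq_segMax (l : List Int) (hl : l ≠ []) :
    PySem.List.max? l (fun x => x) = some (segMax l) := by
  cases l with
  | nil => cases hl rfl
  | cons c r => exact PySem.List.max?_id_cons c r

-- the clamped slice start of an admitted query is a valid position
theorem clamp_lt (n : Nat) (q : Int) (hn : 0 < n) (h2 : q ≤ (n : Int)) :
    PySem.List.clampIdx n (q - 1) < n := by
  by_cases hq : 1 ≤ q
  · have hq1 : q - 1 = (((q - 1).toNat : Nat) : Int) := by omega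
    rw [hq1, PySem.List.clampIdx_natCast]
    omega
  · have hk : q - 1 = -((((1 - q).toNat : Nat)) : Int) := by omega
    rw [hk, PySem.List.clampIdx_neg_natCast _ _ (by omega)]
    omega

-- splitting a suffix of cars at a smaller (clamped) query position
theorem drop_eq_slice_append (cars : List Int) (q prev : Int)
    (hlt : PySem.List.clampIdx cars.length (q - 1) < PySem.List.clampIdx cars.length (prev - 1)) :
    cars.drop (PySem.List.clampIdx cars.length (q - 1))
      = PySem.List.slice cars (some (q - 1)) (some (prev - 1))
        ++ cars.drop (PySem.List.clampIdx cars.length (prev - 1)) := by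
  have hsl : PySem.List.slice cars (some (q - 1)) (some (prev - 1))
      = (cars.drop (PySem.List.clampIdx cars.length (q - 1))).take
          (PySem.List.clampIdx cars.length (prev - 1) - PySem.List.clampIdx cars.length (q - 1)) := rfl
  have h2 : cars.drop (PySem.List.clampIdx cars.length (prev - 1))
      = (cars.drop (PySem.List.clampIdx cars.length (q - 1))).drop
          (PySem.List.clampIdx cars.length (prev - 1) - PySem.List.clampIdx cars.length (q - 1)) := by
    rw [List.drop_drop]
    congr 1
    omega
  rw [hsl, h2]
  exact (List.take_append_drop _ _).symm

-- A's loop invariant: starting from the correct record for the suffix at prev,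
-- the loop appends the suffix-frequency of every remaining query
theorem freqLoopA_spec (cars : List Int) (prev : Int) (rest : List Int) (ans : List Int)
    (hn : 0 < cars.length)
    (hb : ∀ q ∈ (prev :: rest), q ≤ (cars.length : Int))
    (hsorted : (prev :: rest).Pairwise (fun a b => b ≤ a))
    (hmono : (prev :: rest).Pairwise (fun a b => b < a →
        PySem.List.clampIdx cars.length (b - 1) < PySem.List.clampIdx cars.length (a - 1))) :
    freqLoopA cars prev rest (segMax (cars.drop (PySem.List.clampIdx cars.length (prev - 1))))
        (segCnt (cars.drop (PySem.List.clampIdx cars.length (prev - 1)))) ans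
      = ans ++ rest.map (fun q => segCnt (cars.drop (PySem.List.clampIdx cars.length (q - 1)))) := by
  induction rest generalizing prev ans with
  | nil => simp [freqLoopA]
  | cons q rest' ih =>
    have hq := hb q (by simp)
    have hprev := hb prev (by simp)
    have hb' : ∀ x ∈ (q :: rest'), x ≤ (cars.length : Int) :=
      fun x hx => hb x (List.mem_cons_of_mem prev hx)
    have hqle : q ≤ prev := (List.pairwise_cons.1 hsorted).1 q (by simp)
    have hsorted' : (q :: rest').Pairwise (fun a b => b ≤ a) :=
      (List.pairwise_cons.1 hsorted).2
    have hmono' := (List.pairwise_cons.1 hmono).2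
    by_cases hqp : q = prev
    · subst hqp
      have hstep : freqLoopA cars q (q :: rest')
            (segMax (cars.drop (PySem.List.clampIdx cars.length (q - 1))))
            (segCnt (cars.drop (PySem.List.clampIdx cars.length (q - 1)))) ans
          = freqLoopA cars q rest'
            (segMax (cars.drop (PySem.List.clampIdx cars.length (q - 1))))
            (segCnt (cars.drop (PySem.List.clampIdx cars.length (q - 1))))
            (ans ++ [segCnt (cars.drop (PySem.List.clampIdx cars.length (q - 1)))]) := by
        simp [freqLoopA]
      rw [hstep, ih q _ hb' hsorted' hmono']
      simp only [List.map_cons, List.append_assoc, List.singleton_append]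
    · have hlt : q < prev := lt_of_le_of_ne hqle hqp
      have helt : PySem.List.clampIdx cars.length (q - 1) < PySem.List.clampIdx cars.length (prev - 1) :=
        (List.pairwise_cons.1 hmono).1 q (by simp) hlt
      have hep : PySem.List.clampIdx cars.length (prev - 1) < cars.length :=
        clamp_lt cars.length prev hn hprev
      set seg := PySem.List.slice cars (some (q - 1)) (some (prev - 1)) with hseg
      set S := cars.drop (PySem.List.clampIdx cars.length (prev - 1)) with hS
      have hsplit : cars.drop (PySem.List.clampIdx cars.length (q - 1)) = seg ++ S :=
        drop_eq_slice_append cars q prev helt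
      have hSne : S ≠ [] := by
        rw [hS, ← List.length_pos_iff, List.length_drop]
        omega
      have hsegne : seg ≠ [] := by
        have hsl : seg = (cars.drop (PySem.List.clampIdx cars.length (q - 1))).take
            (PySem.List.clampIdx cars.length (prev - 1) - PySem.List.clampIdx cars.length (q - 1)) := rfl
        rw [hsl, ← List.length_pos_iff, List.length_take, List.length_drop]
        omega
      have hcm : (PySem.List.max? seg (fun x => x)).getD 0 = segMax seg := by
        rw [max?_eq_segMax seg hsegne]
        rfl
      have hmaxD : segMax (cars.drop (PySem.List.clampIdx cars.length (q - 1)))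
          = max (segMax seg) (segMax S) := by
        rw [hsplit]
        exact segMax_append seg S hsegne hSne
      have hcntD : segCnt (cars.drop (PySem.List.clampIdx cars.length (q - 1)))
          = (seg.count (segMax (cars.drop (PySem.List.clampIdx cars.length (q - 1)))) : Int)
            + (S.count (segMax (cars.drop (PySem.List.clampIdx cars.length (q - 1)))) : Int) := by
        rw [segCnt, hsplit, List.count_append, ← hsplit]
        push_cast
        rfl
      have hstep : freqLoopA cars prev (q :: rest') (segMax S) (segCnt S) ans
          = (if ((PySem.List.max? seg (fun x => x)).getD 0) < segMax S then
              freqLoopA cars q rest' (segMax S) (segCnt S) (ans ++ [segCnt S])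
            else if ((PySem.List.max? seg (fun x => x)).getD 0) == segMax S then
              freqLoopA cars q rest' (segMax S)
                (segCnt S + (PySem.List.count seg ((PySem.List.max? seg (fun x => x)).getD 0) : Int))
                (ans ++ [segCnt S + (PySem.List.count seg ((PySem.List.max? seg (fun x => x)).getD 0) : Int)])
            else
              freqLoopA cars q rest' ((PySem.List.max? seg (fun x => x)).getD 0)
                (PySem.List.count seg ((PySem.List.max? seg (fun x => x)).getD 0) : Int)
                (ans ++ [(PySem.List.count seg ((PySem.List.max? seg (fun x => x)).getD 0) : Int)])) := by
        simp only [freqLoopA, ← hseg]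
        rw [if_neg (by simp [hqp])]
      rw [hstep, hcm]
      rcases lt_trichotomy (segMax seg) (segMax S) with h | h | h
      · -- pruned: max of the new segment is smaller
        have hmD : segMax (cars.drop (PySem.List.clampIdx cars.length (q - 1))) = segMax S := by
          rw [hmaxD, max_eq_right (le_of_lt h)]
        have hcD : segCnt (cars.drop (PySem.List.clampIdx cars.length (q - 1))) = segCnt S := by
          rw [hcntD, hmD, count_eq_zero_of_gt_segMax seg (segMax S) h]
          simp [segCnt]
        rw [if_pos h, ← hmD, ← hcD, ih q _ hb' hsorted' hmono']
        simp only [List.map_cons, List.append_assoc, List.singleton_append]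
      · -- equal maxima: frequencies add
        have hmD : segMax (cars.drop (PySem.List.clampIdx cars.length (q - 1))) = segMax S := by
          rw [hmaxD, h, max_self]
        have hcD : segCnt (cars.drop (PySem.List.clampIdx cars.length (q - 1)))
            = segCnt S + (PySem.List.count seg (segMax seg) : Int) := by
          rw [hcntD, hmD, ← h, PySem.List.count_eq, h, segCnt]
          ring
        rw [if_neg (by omega), if_pos (by simp [h]), ← hmD, ← hcD, ih q _ hb' hsorted' hmono']
        simp only [List.map_cons, List.append_assoc, List.singleton_append]
      · -- larger max: fresh record
        have hmD : segMax (cars.drop (PySem.List.clampIdx cars.length (q - 1))) = segMax seg := by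
          rw [hmaxD, max_eq_left (le_of_lt h)]
        have hcD : segCnt (cars.drop (PySem.List.clampIdx cars.length (q - 1)))
            = (PySem.List.count seg (segMax seg) : Int) := by
          rw [hcntD, hmD, count_eq_zero_of_gt_segMax S (segMax seg) h, PySem.List.count_eq]
          simp
        rw [if_neg (by omega), if_neg (by simp; omega), ← hcD, ← hmD, ih q _ hb' hsorted' hmono']
        simp only [List.map_cons, List.append_assoc, List.singleton_append]

-- B's loop appends, for each query, the frequency of the max of the suffix at q
theorem bLoop_spec (cars : List Int) (qs : List Int) (ans : List Int)
    (hn : 0 < cars.length) (hb : ∀ q ∈ qs, q ≤ (cars.length : Int)) :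
    bLoop cars qs ans
      = ans ++ qs.map (fun q => segCnt (cars.drop (PySem.List.clampIdx cars.length (q - 1)))) := by
  induction qs generalizing ans with
  | nil => simp [bLoop]
  | cons q rest ih =>
    have hq := hb q (by simp)
    have hsuf : PySem.List.slice cars (some (q - 1)) none
        = cars.drop (PySem.List.clampIdx cars.length (q - 1)) :=
      PySem.List.slice_some_none cars (q - 1)
    have hne : cars.drop (PySem.List.clampIdx cars.length (q - 1)) ≠ [] := by
      rw [← List.length_pos_iff, List.length_drop]
      have := clamp_lt cars.length q hn hq
      omega
    have hm : (PySem.List.max? (PySem.List.slice cars (some (q - 1)) none) (fun x => x)).getD 0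
        = segMax (cars.drop (PySem.List.clampIdx cars.length (q - 1))) := by
      rw [hsuf, max?_eq_segMax _ hne]
      rfl
    have hstep : bLoop cars (q :: rest) ans
        = bLoop cars rest (ans ++ [(PySem.List.count (PySem.List.slice cars (some (q - 1)) none)
            ((PySem.List.max? (PySem.List.slice cars (some (q - 1)) none) (fun x => x)).getD 0) : Int)]) := rfl
    have hc : (PySem.List.count (PySem.List.slice cars (some (q - 1)) none)
          ((PySem.List.max? (PySem.List.slice cars (some (q - 1)) none) (fun x => x)).getD 0) : Int)
        = segCnt (cars.drop (PySem.List.clampIdx cars.length (q - 1))) := by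
      rw [hm, hsuf, PySem.List.count_eq, segCnt]
    rw [hstep, hc, ih _ (fun x hx => hb x (List.mem_cons_of_mem q hx))]
    simp only [List.map_cons, List.append_assoc, List.singleton_append]

-- ===== VERDICT (by name: the statement is the Claim_ definition above) =====
theorem freq_of_max_spec : Claim_equal_freq_of_max := by
  unfold Claim_equal_freq_of_max
  intro cars carQ _ hpre
  unfold Spec_freq_of_max freq_of_max freq_of_max_alt
  obtain ⟨hcne, hne, hbound, hmono⟩ := hpre
  have hsne : PySem.List.sorted carQ (fun x => x) true ≠ [] := by
    rw [Ne, PySem.List.sorted_eq_nil_iff]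
    exact hne
  have hn : 0 < cars.length := List.length_pos_iff.2 hcne
  have hbs : ∀ q ∈ PySem.List.sorted carQ (fun x => x) true,
      q ≤ (cars.length : Int) :=
    fun q hq => hbound q ((PySem.List.mem_sorted carQ _ true q).1 hq)
  have hms : (PySem.List.sorted carQ (fun x => x) true).Pairwise (fun a b => b < a →
      PySem.List.clampIdx cars.length (b - 1) < PySem.List.clampIdx cars.length (a - 1)) := by
    refine List.pairwise_of_forall_mem_list ?_
    intro a ha b hb hba
    exact hmono b ((PySem.List.mem_sorted carQ _ true b).1 hb)
      a ((PySem.List.mem_sorted carQ _ true a).1 ha) hba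
  have hps := PySem.List.sorted_pairwise_rev carQ (fun x => x)
  cases hs : PySem.List.sorted carQ (fun x => x) true with
  | nil => cases hsne hs
  | cons q0 rest =>
    rw [hs] at hbs hps hms
    have hq0 := hbs q0 (by simp)
    simp only []
    have hseg0 : PySem.List.slice cars (some (q0 - 1)) none
        = cars.drop (PySem.List.clampIdx cars.length (q0 - 1)) :=
      PySem.List.slice_some_none cars (q0 - 1)
    have hs0ne : cars.drop (PySem.List.clampIdx cars.length (q0 - 1)) ≠ [] := by
      rw [← List.length_pos_iff, List.length_drop]
      have := clamp_lt cars.length q0 hn hq0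
      omega
    have hrm : (PySem.List.max? (PySem.List.slice cars (some (q0 - 1)) none) (fun x => x)).getD 0
        = segMax (cars.drop (PySem.List.clampIdx cars.length (q0 - 1))) := by
      rw [hseg0, max?_eq_segMax _ hs0ne]
      rfl
    have hrf : (PySem.List.count (PySem.List.slice cars (some (q0 - 1)) none)
          ((PySem.List.max? (PySem.List.slice cars (some (q0 - 1)) none) (fun x => x)).getD 0) : Int)
        = segCnt (cars.drop (PySem.List.clampIdx cars.length (q0 - 1))) := by
      rw [hrm, hseg0, PySem.List.count_eq, segCnt]
    rw [hrf, hrm, freqLoopA_spec cars q0 rest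
      [segCnt (cars.drop (PySem.List.clampIdx cars.length (q0 - 1)))] hn hbs hps hms,
      bLoop_spec cars (q0 :: rest) [] hn hbs]
    simp only [List.map_cons, List.singleton_append, List.nil_append]
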